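-- pv_equiv track=rewrite | github.com/bennellis/dexmv-sim | examples/retarget_umetrack_to_orca.py | consolidate_close_timestamps
-- ===== SOURCE A (Python) =====
-- def consolidate_close_timestamps(
--     timestamps: list[int], threshold_ns: int
-- ) -> tuple[list[int], dict[str, int]]:
--     out = list(timestamps)
--     threshold_ns = int(threshold_ns)
--     if threshold_ns <= 0 or len(out) <= 1:
--         return out, {
--             "input_count": len(out),
--             "output_count": len(out),
--             "removed_count": 0,
--             "group_count": len(out),
--             "max_group_size": 1 if out else 0,
--         }
--
--     consolidated = [out[0]]
--     group_count = 1
--     group_size = 1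
--     max_group_size = 1
--     prev_ts = out[0]
--     for ts in out[1:]:
--         if int(ts) - int(prev_ts) <= threshold_ns:
--             group_size += 1
--             max_group_size = max(max_group_size, group_size)
--         else:
--             consolidated.append(ts)
--             group_count += 1
--             group_size = 1
--         prev_ts = ts
--     return consolidated, {
--         "input_count": len(out),
--         "output_count": len(consolidated),
--         "removed_count": len(out) - len(consolidated),
--         "group_count": group_count,
--         "max_group_size": max_group_size,
--     }
-- ===== SOURCE B (Python) =====
-- def _group_sizes(is_break):
--     sizes = []
--     run = 1
--     for brk in is_break:
--         if brk:
--             sizes.append(run)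
--             run = 1
--         else:
--             run += 1
--     sizes.append(run)
--     return sizes
--
--
-- def consolidate_close_timestamps(timestamps, threshold_ns):
--     out = list(timestamps)
--     threshold_ns = int(threshold_ns)
--     if threshold_ns <= 0 or len(out) <= 1:
--         return out, {
--             "input_count": len(out),
--             "output_count": len(out),
--             "removed_count": 0,
--             "group_count": len(out),
--             "max_group_size": 1 if out else 0,
--         }
--     is_break = [int(b) - int(a) > threshold_ns for a, b in zip(out, out[1:])]
--     consolidated = [out[0]] + [ts for ts, brk in zip(out[1:], is_break) if brk]
--     sizes = _group_sizes(is_break)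
--     return consolidated, {
--         "input_count": len(out),
--         "output_count": len(consolidated),
--         "removed_count": len(out) - len(consolidated),
--         "group_count": len(sizes),
--         "max_group_size": max(sizes),
--     }
-- ===== Notes on version B (the rewrite author's own statement) =====
-- stated objective: alternative
-- what changed: A's single fused pass maintaining five state variables (consolidated, group_count, group_size, max_group_size, prev_ts) is replaced by a staged decomposition: a break-flag table from zipping consecutive pairs, the consolidated list as a comprehension over that table, and a separate run-length list whose length and max give the group stats.
import Mathlib
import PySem

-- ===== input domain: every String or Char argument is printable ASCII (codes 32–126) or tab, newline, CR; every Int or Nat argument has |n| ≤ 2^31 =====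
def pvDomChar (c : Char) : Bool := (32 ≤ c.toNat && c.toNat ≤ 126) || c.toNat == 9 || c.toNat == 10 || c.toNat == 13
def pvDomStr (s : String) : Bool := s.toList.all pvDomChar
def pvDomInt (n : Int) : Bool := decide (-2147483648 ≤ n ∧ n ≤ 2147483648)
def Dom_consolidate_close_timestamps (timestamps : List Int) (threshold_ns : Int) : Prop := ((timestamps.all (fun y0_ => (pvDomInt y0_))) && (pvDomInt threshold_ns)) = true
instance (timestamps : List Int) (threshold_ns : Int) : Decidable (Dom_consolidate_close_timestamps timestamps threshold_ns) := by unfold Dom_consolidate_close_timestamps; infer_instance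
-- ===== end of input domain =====

-- B replaces A's fused single pass over five state variables by staged passes
-- (break-flag table, comprehension, run-length list); objective: alternative decomposition.

-- ===== PORT A =====
-- loop body of A's single pass (state: consolidated, group_count, group_size, max_group_size, prev_ts)
def pvAStep (threshold_ns : Int) (st : List Int × Int × Int × Int × Int) (ts : Int) :
    List Int × Int × Int × Int × Int :=
  let (cons, gc, gs, mgs, prev) := st
  if ts - prev ≤ threshold_ns then (cons, gc, gs + 1, max mgs (gs + 1), ts)
  else (cons ++ [ts], gc + 1, 1, mgs, ts)

def consolidate_close_timestamps (timestamps : List Int) (threshold_ns : Int) :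
    List Int × (List (String × Int)) :=
  let out := timestamps
  if threshold_ns ≤ 0 ∨ out.length ≤ 1 then
    (out, [("input_count", (out.length : Int)), ("output_count", (out.length : Int)),
           ("removed_count", 0), ("group_count", (out.length : Int)),
           ("max_group_size", if out.isEmpty then 0 else 1)])
  else
    match out with
    | [] => ([], [])  -- unreachable: len(out) ≤ 1 was handled above
    | h :: rest =>
      let s := rest.foldl (pvAStep threshold_ns) ([h], 1, 1, 1, h)
      (s.1, [("input_count", (out.length : Int)),
             ("output_count", (s.1.length : Int)),
             ("removed_count", (out.length : Int) - (s.1.length : Int)),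
             ("group_count", s.2.1),
             ("max_group_size", s.2.2.2.1)])

-- ===== PORT B =====
-- Source B's _group_sizes helper: run lengths of the break-flag list
def pvSizesStep (s : List Int × Int) (brk : Bool) : List Int × Int :=
  if brk then (s.1 ++ [s.2], 1) else (s.1, s.2 + 1)

def pvGroupSizes (is_break : List Bool) : List Int :=
  let s := is_break.foldl pvSizesStep ([], 1)
  s.1 ++ [s.2]

def consolidate_close_timestamps_alt (timestamps : List Int) (threshold_ns : Int) :
    List Int × (List (String × Int)) :=
  let out := timestamps
  if threshold_ns ≤ 0 ∨ out.length ≤ 1 then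
    (out, [("input_count", (out.length : Int)), ("output_count", (out.length : Int)),
           ("removed_count", 0), ("group_count", (out.length : Int)),
           ("max_group_size", if out.isEmpty then 0 else 1)])
  else
    match out with
    | [] => ([], [])  -- unreachable
    | h :: rest =>
      let is_break := (out.zip rest).map (fun p => decide (p.2 - p.1 > threshold_ns))
      let consolidated := h :: ((rest.zip is_break).filter (fun p => p.2)).map (fun p => p.1)
      let sizes := pvGroupSizes is_break
      let mgs : Int := match sizes with | [] => 0 | x :: xs => xs.foldl max x  -- max(sizes), nonempty
      (consolidated, [("input_count", (out.length : Int)),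
                      ("output_count", (consolidated.length : Int)),
                      ("removed_count", (out.length : Int) - (consolidated.length : Int)),
                      ("group_count", (sizes.length : Int)),
                      ("max_group_size", mgs)])

-- ===== PRECONDITION & SPEC =====
def Spec_consolidate_close_timestamps (timestamps : List Int) (threshold_ns : Int) (out : List Int × (List (String × Int))) : Prop := out = consolidate_close_timestamps_alt timestamps threshold_ns
instance (timestamps : List Int) (threshold_ns : Int) (out : List Int × (List (String × Int))) : Decidable (Spec_consolidate_close_timestamps timestamps threshold_ns out) := by unfold Spec_consolidate_close_timestamps; infer_instance

-- ===== CLAIM (what is proved, stated in full; the proofs are below) =====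
def Claim_equal_consolidate_close_timestamps : Prop := ∀ (timestamps : List Int) (threshold_ns : Int), Dom_consolidate_close_timestamps timestamps threshold_ns → Spec_consolidate_close_timestamps timestamps threshold_ns (consolidate_close_timestamps timestamps threshold_ns)

-- ===== LEMMAS AND PROOFS =====

-- recursive characterisations of B's zip-based tables
def pvFlags (thr prev : Int) : List Int → List Bool
  | [] => []
  | x :: xs => decide (x - prev > thr) :: pvFlags thr x xs

def pvKeeps (thr prev : Int) : List Int → List Int
  | [] => []
  | x :: xs => if x - prev > thr then x :: pvKeeps thr x xs else pvKeeps thr x xs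

lemma pvGetLast (l : List Int) (a b : Int) :
    l.getLastD a = (a :: l).getLastD b := by
  cases l with
  | nil => rfl
  | cons x xs => simp only [List.getLastD_cons]

lemma pvFlags_zip (thr : Int) (t : List Int) : ∀ prev : Int,
    ((prev :: t).zip t).map (fun p => decide (p.2 - p.1 > thr)) = pvFlags thr prev t := by
  induction t with
  | nil => intro prev; simp [pvFlags]
  | cons x xs ih =>
      intro prev
      simp only [List.zip_cons_cons, List.map_cons, pvFlags, ih x]

lemma pvKeeps_zip (thr : Int) (t : List Int) : ∀ prev : Int,
    ((t.zip (pvFlags thr prev t)).filter (fun p => p.2)).map (fun p => p.1)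
      = pvKeeps thr prev t := by
  induction t with
  | nil => intro prev; simp [pvFlags, pvKeeps]
  | cons x xs ih =>
      intro prev
      by_cases hb : x - prev > thr <;>
        simp [pvFlags, pvKeeps, hb, ih x]

lemma pvSizes_pos (flags : List Bool) : ∀ (acc : List Int) (run : Int),
    1 ≤ run → (∀ x ∈ acc, 1 ≤ x) →
    (∀ x ∈ (flags.foldl pvSizesStep (acc, run)).1, 1 ≤ x) ∧
      1 ≤ (flags.foldl pvSizesStep (acc, run)).2 := by
  induction flags with
  | nil => intro acc run hr ha; exact ⟨ha, hr⟩
  | cons b bs ih =>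
      intro acc run hr ha
      cases b with
      | false =>
          simpa [pvSizesStep] using ih acc (run + 1) (by omega) ha
      | true =>
          refine ih (acc ++ [run]) 1 le_rfl ?_
          intro x hx
          rcases List.mem_append.1 hx with hx | hx
          · exact ha x hx
          · simp at hx; omega

lemma pvMaxInit (l : List Int) (r : Int) (hl : ∀ x ∈ l, 1 ≤ x) (hr : 1 ≤ r) :
    (match l ++ [r] with | [] => (0 : Int) | x :: xs => xs.foldl max x)
      = (l ++ [r]).foldl max 0 := by
  cases l with
  | nil => simp [max_def]; omega
  | cons x xs =>
      have hx : 1 ≤ x := hl x (by simp)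
      have : max 0 x = x := max_eq_right (by omega)
      simp [List.foldl, this]

lemma pvMain (thr : Int) (t : List Int) : ∀ (prev : Int) (cons acc : List Int) (run : Int),
    1 ≤ run → (∀ x ∈ acc, 1 ≤ x) →
    t.foldl (pvAStep thr) (cons, (acc.length : Int) + 1, run, (acc ++ [run]).foldl max 0, prev)
      = (cons ++ pvKeeps thr prev t,
         (((pvFlags thr prev t).foldl pvSizesStep (acc, run)).1.length : Int) + 1,
         ((pvFlags thr prev t).foldl pvSizesStep (acc, run)).2,
         (((pvFlags thr prev t).foldl pvSizesStep (acc, run)).1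
            ++ [((pvFlags thr prev t).foldl pvSizesStep (acc, run)).2]).foldl max 0,
         t.getLastD prev) := by
  induction t with
  | nil => intro prev cons acc run hr ha; simp [pvFlags, pvKeeps]
  | cons ts t' ih =>
      intro prev cons acc run hr ha
      by_cases hb : ts - prev > thr
      · -- break: close the current group
        have hstep : pvAStep thr (cons, (acc.length : Int) + 1, run, (acc ++ [run]).foldl max 0, prev) ts
            = (cons ++ [ts], (acc.length : Int) + 2, 1, (acc ++ [run]).foldl max 0, ts) := by
          simp [pvAStep, show ¬ (ts - prev ≤ thr) by omega]
          ring
        have hmgs : (acc ++ [run]).foldl max 0 = ((acc ++ [run]) ++ [1]).foldl max 0 := by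
          rw [List.foldl_append (f := max) (l := acc ++ [run]) (l' := [1])]
          have h1 : run ≤ (acc ++ [run]).foldl max 0 := by
            rw [List.foldl_append]; simp only [List.foldl]; exact le_max_right _ _
          simp only [List.foldl]
          exact (max_eq_left (by omega)).symm
        have ha' : ∀ x ∈ acc ++ [run], 1 ≤ x := by
          intro x hx; rcases List.mem_append.1 hx with hx | hx
          · exact ha x hx
          · simp at hx; omega
        have := ih ts (cons ++ [ts]) (acc ++ [run]) 1 le_rfl ha'
        simp only [List.foldl, hstep]
        rw [hmgs]
        have hlen : ((acc ++ [run]).length : Int) + 1 = (acc.length : Int) + 2 := by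
          simp; ring
        rw [← hlen, this]
        simp only [pvFlags, pvKeeps, hb, if_pos, decide_true, List.foldl_cons, pvSizesStep,
          List.append_assoc, List.singleton_append]
        rw [pvGetLast t' ts prev]
      · -- no break: extend the current group
        have hstep : pvAStep thr (cons, (acc.length : Int) + 1, run, (acc ++ [run]).foldl max 0, prev) ts
            = (cons, (acc.length : Int) + 1, run + 1, (acc ++ [run + 1]).foldl max 0, ts) := by
          have hcond : ts - prev ≤ thr := by omega
          have hmax : max ((acc ++ [run]).foldl max 0) (run + 1) = (acc ++ [run + 1]).foldl max 0 := by
            rw [List.foldl_append, List.foldl_append]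
            simp only [List.foldl]
            rw [max_assoc]
            congr 1
            exact max_eq_right (by omega)
          simp [pvAStep, hcond]
        have := ih ts cons acc (run + 1) (by omega) ha
        simp only [List.foldl, hstep]
        rw [this]
        simp only [pvFlags, pvKeeps, hb, if_neg, decide_false, List.foldl_cons, pvSizesStep,
          Bool.false_eq_true, not_false_eq_true]
        rw [pvGetLast t' ts prev]

-- ===== VERDICT (by name: the statement is the Claim_ definition above) =====
theorem consolidate_close_timestamps_spec : Claim_equal_consolidate_close_timestamps := by
  intro timestamps threshold_ns _
  unfold Spec_consolidate_close_timestamps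
  unfold consolidate_close_timestamps consolidate_close_timestamps_alt
  by_cases hg : threshold_ns ≤ 0 ∨ timestamps.length ≤ 1
  · simp [hg]
  · simp only [hg, if_false]
    cases timestamps with
    | nil => exact absurd (Or.inr (by simp)) hg
    | cons h rest =>
        have hmain := pvMain threshold_ns rest h [h] [] 1 le_rfl (by simp)
        have hinit : (([] : List Int).length : Int) + 1 = (1 : Int) := by simp
        have hinit2 : (([] : List Int) ++ [1]).foldl max 0 = (1 : Int) := by simp
        rw [hinit, hinit2] at hmain
        simp only [pvFlags_zip, pvKeeps_zip, hmain, pvGroupSizes]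
        have hpos := pvSizes_pos (pvFlags threshold_ns h rest) [] 1 le_rfl (by simp)
        rw [pvMaxInit _ _ hpos.1 hpos.2]
        simp
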